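-- pv_equiv track=rewrite | github.com/katiesteckles/advent-of-code | 2023/day09.py | find_prev_item
-- ===== SOURCE A (Python) =====
-- def find_prev_item(list0):
--     differences = [list0]
--     while not all(value == 0 for value in differences[-1]):
--         new_diffs = []
--         for i in range(len(differences[-1])-1):
--             new_diffs.append(differences[-1][i+1] - differences[-1][i])
--         differences.append(new_diffs)
--     # final bit where you find the end ones
--     differences[-1] = [0] + differences[-1]
--     for i in range(len(differences)-2,-1,-1):
--         differences[i] = [differences[i][0] - differences[i+1][0]] + differences[i]
--     return differences[0][0]
-- ===== SOURCE B (Python) =====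
-- def find_prev_item(list0):
--     # Newton backward extrapolation: prev = sum_j (-1)^j * C(n, j+1) * list0[j],
--     # computed in one pass with an incrementally updated binomial coefficient.
--     n = len(list0)
--     total = 0
--     c = n          # C(n, 1)
--     sign = 1
--     for j, v in enumerate(list0):
--         total += sign * c * v
--         c = c * (n - j - 1) // (j + 2)   # C(n, j+2)
--         sign = -sign
--     return total
-- ===== Notes on version B (the rewrite author's own statement) =====
-- stated objective: alternative
-- what changed: Replaced the difference-table construction plus backward extrapolation pass by the closed-form Newton backward formula prev = sum_j (-1)^j * C(n,j+1) * list0[j], computed in a single pass with an incrementally updated binomial coefficient (fewer list operations, but the binomial coefficients are big integers, so it is not claimed faster).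
import Mathlib
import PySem

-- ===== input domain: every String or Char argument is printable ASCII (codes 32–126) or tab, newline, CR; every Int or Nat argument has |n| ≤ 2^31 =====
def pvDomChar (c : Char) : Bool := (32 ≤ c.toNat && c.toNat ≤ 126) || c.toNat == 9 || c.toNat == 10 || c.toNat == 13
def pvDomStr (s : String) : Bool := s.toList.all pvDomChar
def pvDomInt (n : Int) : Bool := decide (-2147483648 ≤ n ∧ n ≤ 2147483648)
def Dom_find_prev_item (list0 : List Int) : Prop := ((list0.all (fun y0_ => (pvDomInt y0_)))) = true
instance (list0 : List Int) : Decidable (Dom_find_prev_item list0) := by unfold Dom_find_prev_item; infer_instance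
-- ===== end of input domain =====

-- B replaces A's difference-table construction by the one-pass closed-form Newton
-- backward extrapolation sum_j (-1)^j * C(n,j+1) * list0[j]; same return value everywhere.

-- ===== PORT A =====
-- inner loop 'for i in range(len(row)-1): new_diffs.append(row[i+1]-row[i])' as its
-- obvious structural recursion over consecutive pairs
def rowStep : List Int → List Int
  | x :: y :: rest => (y - x) :: rowStep (y :: rest)
  | _ => []

lemma rowStep_length : ∀ (l : List Int), (rowStep l).length = l.length - 1
  | [] => rfl
  | [_] => rfl
  | _ :: y :: rest => by simp [rowStep, rowStep_length (y :: rest)]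

-- the while loop building 'differences', keyed (as in A) on the last row being all zero
def buildRows (l : List Int) : List (List Int) :=
  if l.all (fun value => value == 0) then [l]
  else l :: buildRows (rowStep l)
termination_by l.length
decreasing_by
  rw [rowStep_length]
  cases l with
  | nil => simp_all
  | cons a t => simp

-- the final backward pass: last row gets 0 prepended (contributes 0), every earlier
-- row contributes row[0] minus the value from the row below
def backAux : List (List Int) → Int
  | [] => 0
  | [_] => 0
  | r :: r2 :: rest => r.headD 0 - backAux (r2 :: rest)

def find_prev_item (list0 : List Int) : Int :=
  backAux (buildRows list0)

-- ===== PORT B =====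
-- one pass: total += sign*c*v; c = c*(n-j-1)//(j+2); sign = -sign
def altLoop (n : Int) (j : Int) (total c sign : Int) : List Int → Int
  | [] => total
  | v :: rest =>
      altLoop n (j + 1) (total + sign * c * v)
        (PySem.Int.floordiv (c * (n - j - 1)) (j + 2)) (-sign) rest

def find_prev_item_alt (list0 : List Int) : Int :=
  altLoop (list0.length : Int) 0 0 (list0.length : Int) 1 list0

-- ===== PRECONDITION & SPEC =====
def Spec_find_prev_item (list0 : List Int) (out : Int) : Prop := out = find_prev_item_alt list0
instance (list0 : List Int) (out : Int) : Decidable (Spec_find_prev_item list0 out) := by unfold Spec_find_prev_item; infer_instance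

-- ===== CLAIM (what is proved, stated in full; the proofs are below) =====
def Claim_equal_find_prev_item : Prop := ∀ (list0 : List Int), Dom_find_prev_item list0 → Spec_find_prev_item list0 (find_prev_item list0)

-- ===== LEMMAS AND PROOFS =====

-- the common mathematical value: sum over the list of (-1)^(j+i) * C(n, j+1+i) * t[i]
def coefSum (n : ℕ) : ℕ → List Int → Int
  | _, [] => 0
  | j, a :: t => (-1) ^ j * ((n.choose (j + 1) : ℤ)) * a + coefSum n (j + 1) t

lemma coefSum_allzero : ∀ (t : List Int) (n j : ℕ),
    (t.all (fun value => value == 0)) = true → coefSum n j t = 0 := by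
  intro t
  induction t with
  | nil => intro n j _; simp [coefSum]
  | cons a t ih =>
      intro n j h
      simp only [List.all_cons, Bool.and_eq_true, beq_iff_eq] at h
      simp [coefSum, h.1, ih n (j + 1) h.2]

lemma buildRows_ne_nil (l : List Int) : buildRows l ≠ [] := by
  rw [buildRows]; split <;> simp

lemma backAux_cons (r : List Int) (rows : List (List Int)) (h : rows ≠ []) :
    backAux (r :: rows) = r.headD 0 - backAux rows := by
  cases rows with
  | nil => exact absurd rfl h
  | cons x xs => rfl

-- key telescoping identity relating a row and its difference row (Pascal's rule)
lemma lemD : ∀ (t : List Int) (a : Int) (j m : ℕ), m = j + t.length →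
    coefSum (m + 1) j (a :: t) + coefSum m j (rowStep (a :: t))
      = (-1) ^ j * ((m.choose j : ℕ) : ℤ) * a := by
  intro t
  induction t with
  | nil =>
      intro a j m hm
      subst hm
      simp [coefSum, rowStep, Nat.choose_self]
  | cons b t' ih =>
      intro a j m hm
      have hm' : m = (j + 1) + t'.length := by simp at hm; omega
      have key := ih b (j + 1) m hm'
      simp only [rowStep, coefSum] at key ⊢
      have pascal : ((m + 1).choose (j + 1) : ℤ) = (m.choose j : ℤ) + (m.choose (j + 1) : ℤ) := by
        have := Nat.choose_succ_succ m j
        exact_mod_cast congrArg (Nat.cast : ℕ → ℤ) this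
      rw [pascal]
      linear_combination key

-- A's value equals the closed-form sum
lemma A_eq_coefSum : ∀ (N : ℕ) (l : List Int), l.length ≤ N →
    backAux (buildRows l) = coefSum l.length 0 l := by
  intro N
  induction N with
  | zero =>
      intro l h
      have : l = [] := by cases l <;> simp_all
      subst this
      simp [buildRows, backAux, coefSum]
  | succ N ih =>
      intro l h
      rw [buildRows]
      by_cases hz : l.all (fun value => value == 0) = true
      · rw [if_pos hz]
        simp [backAux, coefSum_allzero l l.length 0 hz]
      · rw [if_neg hz]
        cases l with
        | nil => simp at hz
        | cons a t =>
            rw [backAux_cons _ _ (buildRows_ne_nil _)]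
            have hlen : (rowStep (a :: t)).length = t.length := by
              rw [rowStep_length]; simp
            rw [ih (rowStep (a :: t)) (by rw [hlen]; simp at h; omega), hlen]
            have hd := lemD t a 0 t.length (by omega)
            simp only [pow_zero, Nat.choose_zero_right, Nat.cast_one, one_mul] at hd
            simp only [List.headD_cons, List.length_cons]
            linarith [hd]

-- B's loop maintains total = prefix sum, c = C(n,j+1), sign = (-1)^j
lemma altLoop_eq : ∀ (t : List Int) (j n : ℕ) (total : Int), n = j + t.length →
    altLoop (n : Int) (j : Int) total ((n.choose (j + 1) : ℤ)) ((-1) ^ j) t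
      = total + coefSum n j t := by
  intro t
  induction t with
  | nil => intro j n total _; simp [altLoop, coefSum]
  | cons v rest ih =>
      intro j n total hn
      have hjn : j + 1 ≤ n := by simp at hn; omega
      simp only [altLoop]
      have hsub : (n : ℤ) - (j : ℤ) - 1 = ((n - (j + 1) : ℕ) : ℤ) := by
        push_cast [Nat.cast_sub hjn]; ring
      have hc : (n.choose (j + 1) : ℤ) * ((n : ℤ) - (j : ℤ) - 1)
          = ((n.choose (j + 2) * (j + 2) : ℕ) : ℤ) := by
        have hnat : n.choose (j + 1) * (n - (j + 1)) = n.choose (j + 2) * (j + 2) :=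
          (Nat.choose_succ_right_eq n (j + 1)).symm
        rw [hsub, ← Nat.cast_mul, hnat]
      have hfd : PySem.Int.floordiv (((n.choose (j + 2) * (j + 2) : ℕ) : ℤ)) ((j : ℤ) + 2)
          = (n.choose (j + 2) : ℤ) := by
        rw [PySem.Int.floordiv_eq_ediv_of_pos (by positivity)]
        push_cast
        rw [mul_comm ((n.choose (j + 2) : ℤ)) _, Int.mul_ediv_cancel_left _ (by positivity)]
      rw [hc, hfd]
      rw [show -((-1 : ℤ) ^ j) = (-1 : ℤ) ^ (j + 1) from by ring]
      rw [show ((j : ℤ) + 1) = ((j + 1 : ℕ) : ℤ) from by push_cast; ring]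
      rw [ih (j + 1) n _ (by simp at hn; omega)]
      simp only [coefSum]
      ring

lemma B_eq_coefSum (l : List Int) : find_prev_item_alt l = coefSum l.length 0 l := by
  unfold find_prev_item_alt
  have h := altLoop_eq l 0 l.length 0 (by omega)
  simpa [Nat.choose_one_right] using h

-- ===== VERDICT (by name: the statement is the Claim_ definition above) =====
theorem find_prev_item_spec : Claim_equal_find_prev_item := by
  intro l _
  unfold Spec_find_prev_item
  rw [B_eq_coefSum]
  exact A_eq_coefSum l.length l le_rfl
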